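-- pv_equiv track=rewrite | github.com/Aadithya97/Analysis-of-Algorithms | aoa_proj_2_aadi_overall_code_with_test_cases.py | find_p1_m2n2
-- ===== SOURCE A (Python) =====
-- def preprocess(p, h):
--     m, n = len(p), len(p[0])
--     count = [[0] * (n + 1) for _ in range(m + 1)]
--
--     for i in range(1, m + 1):
--         for j in range(1, n + 1):
--             count[i][j] = count[i - 1][j] + count[i][j - 1] - count[i - 1][j - 1] + (p[i - 1][j - 1] >= h)
--
--     return count
--
-- def valid_submatrix(count, r1, c1, r2, c2):
--     return count[r2 + 1][c2 + 1] - count[r1][c2 + 1] - count[r2 + 1][c1] + count[r1][c1] == (r2 - r1 + 1) * (c2 - c1 + 1)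
--
-- def find_p1_m2n2(p, h):
--     m, n = len(p), len(p[0])
--     max_size = 0
--     top_left, bottom_right = (0, 0), (0, 0)
--     count = preprocess(p, h)
--
--     for r1 in range(m):
--         for c1 in range(n):
--             for r2 in range(r1, m):
--                 for c2 in range(c1, n):
--                     if r2 - r1 == c2 - c1:  # Ensure submatrix is square
--                         if valid_submatrix(count, r1, c1, r2, c2): # check if submatrix is valid
--                             size = (r2 - r1 + 1) * (c2 - c1 + 1) # calculate size of submatrix
--                             if size > max_size:       #update max size found
--                                 max_size = size
--                                 top_left, bottom_right = (r1+1, c1+1), (r2+1, c2+1)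
--
--     return top_left + bottom_right
-- ===== SOURCE B (Python) =====
-- def prefix_counts(p, h):
--     m, n = len(p), len(p[0])
--     count = [[0] * (n + 1) for _ in range(m + 1)]
--     for i in range(1, m + 1):
--         for j in range(1, n + 1):
--             count[i][j] = count[i - 1][j] + count[i][j - 1] - count[i - 1][j - 1] + (p[i - 1][j - 1] >= h)
--     return count
--
--
-- def find_p1_m2n2(p, h):
--     m, n = len(p), len(p[0])
--     count = prefix_counts(p, h)
--     # try side lengths from largest to smallest; the first hit is the answer
--     for s in range(min(m, n), 0, -1):
--         for r1 in range(m - s + 1):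
--             for c1 in range(n - s + 1):
--                 if count[r1 + s][c1 + s] - count[r1][c1 + s] - count[r1 + s][c1] + count[r1][c1] == s * s:
--                     return (r1 + 1, c1 + 1, r1 + s, c1 + s)
--     return (0, 0, 0, 0)
-- ===== Notes on version B (the rewrite author's own statement) =====
-- stated objective: faster
-- what changed: Replaces the exhaustive quadruple loop over all submatrices (tracking a running maximum) by a largest-side-first search: iterate the side length s downward and return the first (row-major) valid square, using the same prefix-sum validity test.
import Mathlib
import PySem

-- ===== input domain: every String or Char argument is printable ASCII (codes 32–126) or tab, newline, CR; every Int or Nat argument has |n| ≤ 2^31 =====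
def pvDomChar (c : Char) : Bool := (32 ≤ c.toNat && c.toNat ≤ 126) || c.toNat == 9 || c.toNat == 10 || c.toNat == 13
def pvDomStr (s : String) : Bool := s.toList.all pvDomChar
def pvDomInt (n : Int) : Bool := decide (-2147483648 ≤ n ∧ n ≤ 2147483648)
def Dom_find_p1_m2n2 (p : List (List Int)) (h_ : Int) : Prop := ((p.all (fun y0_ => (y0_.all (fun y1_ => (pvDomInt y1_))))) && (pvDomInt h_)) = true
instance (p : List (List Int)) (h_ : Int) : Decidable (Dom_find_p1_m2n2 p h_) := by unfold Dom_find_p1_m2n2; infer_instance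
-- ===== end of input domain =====

-- B replaces A's exhaustive scan over all submatrices by a largest-side-first search with the
-- same prefix-sum validity test (objective: faster; the early exit drops A's redundant inner loop).

-- ===== PORT A =====
-- preprocess: the 2-D prefix-sum table of the indicator p[i][j] >= h (list-of-lists, built in place)
def pvPreprocess (p : List (List Int)) (h : Int) : List (List Int) :=
  let m := p.length
  let n := (p.getD 0 []).length
  (List.range' 1 m).foldl (fun count i =>
    (List.range' 1 n).foldl (fun count j =>
      let v := (count.getD (i-1) []).getD j 0 + (count.getD i []).getD (j-1) 0
               - (count.getD (i-1) []).getD (j-1) 0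
               + (if h ≤ (p.getD (i-1) []).getD (j-1) 0 then 1 else 0)
      count.set i ((count.getD i []).set j v)) count)
    (List.replicate (m+1) (List.replicate (n+1) (0:Int)))

-- valid_submatrix
def pvValidA (count : List (List Int)) (r1 c1 r2 c2 : Nat) : Bool :=
  decide ((count.getD (r2+1) []).getD (c2+1) 0 - (count.getD r1 []).getD (c2+1) 0
    - (count.getD (r2+1) []).getD c1 0 + (count.getD r1 []).getD c1 0
    = (((r2 - r1 + 1) * (c2 - c1 + 1) : Nat) : Int))

def find_p1_m2n2 (p : List (List Int)) (h_ : Int) : List Int :=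
  let m := p.length
  let n := (p.getD 0 []).length
  let count := pvPreprocess p h_
  let st := (List.range m).foldl (fun st r1 =>
    (List.range n).foldl (fun st c1 =>
      (List.range' r1 (m - r1)).foldl (fun st r2 =>
        (List.range' c1 (n - c1)).foldl (fun st c2 =>
          if r2 - r1 = c2 - c1 then
            if pvValidA count r1 c1 r2 c2 then
              let size : Int := (((r2 - r1 + 1) * (c2 - c1 + 1) : Nat) : Int)
              if st.1 < size then (size, (((r1:Int)+1, (c1:Int)+1), ((r2:Int)+1, (c2:Int)+1)))
              else st
            else st
          else st) st) st) st)
    ((0:Int), (((0:Int),(0:Int)),((0:Int),(0:Int))))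
  [st.2.1.1, st.2.1.2, st.2.2.1, st.2.2.2]

-- ===== PORT B =====
-- prefix_counts (Source B's own copy of the prefix-sum build)
def pvPrefixB (p : List (List Int)) (h : Int) : List (List Int) :=
  let m := p.length
  let n := (p.getD 0 []).length
  (List.range' 1 m).foldl (fun count i =>
    (List.range' 1 n).foldl (fun count j =>
      let v := (count.getD (i-1) []).getD j 0 + (count.getD i []).getD (j-1) 0
               - (count.getD (i-1) []).getD (j-1) 0
               + (if h ≤ (p.getD (i-1) []).getD (j-1) 0 then 1 else 0)
      count.set i ((count.getD i []).set j v)) count)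
    (List.replicate (m+1) (List.replicate (n+1) (0:Int)))

-- the 'if … : return' test of Source B's two inner loops, for side s at top-left (r1, c1)
def pvHitB (count : List (List Int)) (r1 c1 s : Nat) : Bool :=
  decide ((count.getD (r1+s) []).getD (c1+s) 0 - (count.getD r1 []).getD (c1+s) 0
    - (count.getD (r1+s) []).getD c1 0 + (count.getD r1 []).getD c1 0
    = (((s * s : Nat)) : Int))

-- the two inner loops of Source B for a fixed s (return at the first hit, row-major)
def pvFindAtB (count : List (List Int)) (m n s : Nat) : Option (Nat × Nat) :=
  (List.range (m - s + 1)).findSome? (fun r1 =>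
    ((List.range (n - s + 1)).find? (fun c1 => pvHitB count r1 c1 s)).map (fun c1 => (r1, c1)))

-- the outer 'for s in range(min(m,n), 0, -1)' loop of Source B
def pvSearchB (count : List (List Int)) (m n : Nat) : Nat → Option (Nat × Nat × Nat)
  | 0 => none
  | s+1 => match pvFindAtB count m n (s+1) with
    | some (r, c) => some (r, c, s+1)
    | none => pvSearchB count m n s

def find_p1_m2n2_alt (p : List (List Int)) (h_ : Int) : List Int :=
  let m := p.length
  let n := (p.getD 0 []).length
  let count := pvPrefixB p h_
  match pvSearchB count m n (min m n) with
  | some (r, c, s) => [(r:Int)+1, (c:Int)+1, ((r+s : Nat) : Int), ((c+s : Nat) : Int)]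
  | none => [0, 0, 0, 0]

-- ===== PRECONDITION & SPEC =====
-- Pre_ excludes exactly the inputs where the Python A raises IndexError: the empty matrix
-- (p[0] fails) and matrices where some row is shorter than the first row (p[i-1][j-1] fails).
def Pre_find_p1_m2n2 (p : List (List Int)) (h_ : Int) : Prop :=
  p ≠ [] ∧ ∀ row ∈ p, (p.getD 0 []).length ≤ row.length
instance (p : List (List Int)) (h_ : Int) : Decidable (Pre_find_p1_m2n2 p h_) := by
  unfold Pre_find_p1_m2n2; infer_instance

def pvWitness_find_p1_m2n2 : List (List Int) × Int := ([[1, 2], [3, 0]], 1)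

def Spec_find_p1_m2n2 (p : List (List Int)) (h_ : Int) (out : List Int) : Prop := out = find_p1_m2n2_alt p h_
instance (p : List (List Int)) (h_ : Int) (out : List Int) : Decidable (Spec_find_p1_m2n2 p h_ out) := by unfold Spec_find_p1_m2n2; infer_instance

-- ===== CLAIM (what is proved, stated in full; the proofs are below) =====
def Claim_equal_find_p1_m2n2 : Prop := ∀ (p : List (List Int)) (h_ : Int), Dom_find_p1_m2n2 p h_ → Pre_find_p1_m2n2 p h_ → Spec_find_p1_m2n2 p h_ (find_p1_m2n2 p h_)

-- ===== LEMMAS AND PROOFS =====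

def pvMax {a : Type} (P : a → Prop) [DecidablePred P] (f : a → Int) (b : Int) (L : List a) : Int :=
  L.foldl (fun acc c => if P c ∧ acc < f c then f c else acc) b

theorem le_pvMax {a : Type} (P : a → Prop) [DecidablePred P] (f : a → Int) :
    ∀ (L : List a) (b : Int), b ≤ pvMax P f b L := by
  intro L
  induction L with
  | nil => intro b; simp [pvMax]
  | cons c L ih =>
    intro b
    show b ≤ pvMax P f (if P c ∧ b < f c then f c else b) L
    refine le_trans ?_ (ih _)
    split_ifs with h
    · exact le_of_lt h.2
    · exact le_refl b

theorem pvMax_ge {a : Type} (P : a → Prop) [DecidablePred P] (f : a → Int) :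
    ∀ (L : List a) (b : Int) (c : a), c ∈ L → P c → f c ≤ pvMax P f b L := by
  intro L
  induction L with
  | nil => intro b c hc; simp at hc
  | cons d L ih =>
    intro b c hc hP
    rcases List.mem_cons.mp hc with rfl | hc
    · show f c ≤ pvMax P f (if P c ∧ b < f c then f c else b) L
      refine le_trans ?_ (le_pvMax P f L _)
      split_ifs with h
      · exact le_refl _
      · by_contra hlt
        exact h ⟨hP, by omega⟩
    · exact ih _ c hc hP

theorem pvMax_le {a : Type} (P : a → Prop) [DecidablePred P] (f : a → Int) :
    ∀ (L : List a) (b B : Int), b ≤ B → (∀ c ∈ L, P c → f c ≤ B) → pvMax P f b L ≤ B := by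
  intro L
  induction L with
  | nil => intro b B hb _; simpa [pvMax] using hb
  | cons c L ih =>
    intro b B hb h
    show pvMax P f (if P c ∧ b < f c then f c else b) L ≤ B
    refine ih _ B ?_ (fun d hd hPd => h d (List.mem_cons_of_mem _ hd) hPd)
    split_ifs with hc
    · exact h c List.mem_cons_self hc.1
    · exact hb

theorem pvMax_eq_self {a : Type} (P : a → Prop) [DecidablePred P] (f : a → Int) :
    ∀ (L : List a) (b : Int), (∀ c ∈ L, ¬ P c) → pvMax P f b L = b := by
  intro L
  induction L with
  | nil => intro b _; rfl
  | cons c L ih =>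
    intro b h
    show pvMax P f (if P c ∧ b < f c then f c else b) L = b
    rw [if_neg (fun hc => h c List.mem_cons_self hc.1)]
    exact ih b (fun d hd => h d (List.mem_cons_of_mem _ hd))

theorem pvMax_attained {a : Type} (P : a → Prop) [DecidablePred P] (f : a → Int) :
    ∀ (L : List a) (b : Int), pvMax P f b L = b ∨ ∃ c ∈ L, P c ∧ f c = pvMax P f b L := by
  intro L
  induction L with
  | nil => intro b; left; rfl
  | cons c L ih =>
    intro b
    show pvMax P f (if P c ∧ b < f c then f c else b) L = b ∨ _
    by_cases h : P c ∧ b < f c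
    · rw [if_pos h]
      rcases ih (f c) with h1 | ⟨d, hd, hPd, hfd⟩
      · right
        exact ⟨c, List.mem_cons_self, h.1, by
          show f c = pvMax P f (if P c ∧ b < f c then f c else b) L
          rw [if_pos h]; omega⟩
      · right
        exact ⟨d, List.mem_cons_of_mem _ hd, hPd, by
          show f d = pvMax P f (if P c ∧ b < f c then f c else b) L
          rw [if_pos h]; exact hfd⟩
    · rw [if_neg h]
      rcases ih b with h1 | ⟨d, hd, hPd, hfd⟩
      · left; exact h1
      · right
        exact ⟨d, List.mem_cons_of_mem _ hd, hPd, by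
          show f d = pvMax P f (if P c ∧ b < f c then f c else b) L
          rw [if_neg h]; exact hfd⟩

theorem pvFoldChar {a b' : Type} (P : a → Prop) [DecidablePred P] (f : a → Int) (g : a → b') :
    ∀ (L : List a) (b : Int) (x : b'),
    L.foldl (fun st c => if P c ∧ st.1 < f c then (f c, g c) else st) (b, x)
    = if pvMax P f b L = b then (b, x)
      else match L.find? (fun c => decide (P c) && decide (f c = pvMax P f b L)) with
        | some c => (pvMax P f b L, g c)
        | none => (b, x) := by
  intro L
  induction L with
  | nil => intro b x; simp [pvMax]
  | cons c L ih =>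
    intro b x
    rw [List.foldl_cons]
    have hM : pvMax P f b (c :: L) = pvMax P f (if P c ∧ b < f c then f c else b) L := rfl
    by_cases h : P c ∧ b < f c
    · have hst : (if P c ∧ (b, x).1 < f c then (f c, g c) else (b, x)) = (f c, g c) := if_pos h
      rw [hst, hM, if_pos h]
      have hfcM : f c ≤ pvMax P f (f c) L := le_pvMax P f L (f c)
      have hbM : b < pvMax P f (f c) L := by omega
      rw [if_neg (by omega), List.find?_cons]
      by_cases hMfc : f c = pvMax P f (f c) L
      · have hcond : (decide (P c) && decide (f c = pvMax P f (f c) L)) = true := by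
          rw [decide_eq_true h.1, decide_eq_true hMfc, Bool.and_self]
        rw [hcond, ih (f c) (g c), if_pos hMfc.symm]
        show (f c, g c) = (pvMax P f (f c) L, g c)
        rw [← hMfc]
      · have hcond : (decide (P c) && decide (f c = pvMax P f (f c) L)) = false := by
          rw [decide_eq_false hMfc, Bool.and_false]
        rw [hcond, ih (f c) (g c), if_neg (fun hh => hMfc hh.symm)]
        rcases pvMax_attained P f L (f c) with h1 | ⟨d, hd, hPd, hfd⟩
        · exact absurd h1.symm hMfc
        · obtain ⟨v, hv⟩ := Option.isSome_iff_exists.mp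
            ((List.find?_isSome (p := fun e => decide (P e) && decide (f e = pvMax P f (f c) L))).mpr ⟨d, hd, by
              show (decide (P d) && decide (f d = pvMax P f (f c) L)) = true
              rw [decide_eq_true hPd, decide_eq_true hfd, Bool.and_self]⟩)
          rw [hv]
    · have hst : (if P c ∧ (b, x).1 < f c then (f c, g c) else (b, x)) = (b, x) := if_neg h
      rw [hst, hM, if_neg h, ih b x]
      by_cases hMb : pvMax P f b L = b
      · rw [if_pos hMb, if_pos hMb]
      · have hbM : b < pvMax P f b L := by
          have := le_pvMax P f L b; omega
        rw [if_neg hMb, if_neg hMb, List.find?_cons]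
        have hcond : (decide (P c) && decide (f c = pvMax P f b L)) = false := by
          by_cases hPc : P c
          · by_cases hfc : f c = pvMax P f b L
            · exact absurd ⟨hPc, by omega⟩ h
            · rw [decide_eq_false hfc, Bool.and_false]
          · rw [decide_eq_false hPc, Bool.false_and]
        rw [hcond]

theorem pvFind?_flatMap {a b' : Type} (g : a → List b') (p : b' → Bool) :
    ∀ (L : List a), (L.flatMap g).find? p = L.findSome? (fun x => (g x).find? p) := by
  intro L
  induction L with
  | nil => rfl
  | cons c L ih =>
    rw [List.flatMap_cons, List.find?_append, List.findSome?_cons, ih]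
    cases (g c).find? p <;> rfl

theorem pvFind?_unique {a : Type} [DecidableEq a] (L : List a) (p : a → Bool) (w : a)
    (h : ∀ x ∈ L, p x = true → x = w) :
    L.find? p = if w ∈ L ∧ p w = true then some w else none := by
  cases hf : L.find? p with
  | none =>
    rw [if_neg]
    rintro ⟨hw, hpw⟩
    exact (List.find?_eq_none.mp hf w hw) hpw
  | some x =>
    have hx := List.find?_some hf
    have hmem := List.mem_of_find?_eq_some hf
    have hxw := h x hmem hx
    subst hxw
    rw [if_pos ⟨hmem, hx⟩]

theorem pvFindSome?_unique {a b' : Type} [DecidableEq a] (L : List a) (g : a → Option b') (w : a)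
    (h : ∀ x ∈ L, g x ≠ none → x = w) :
    L.findSome? g = if w ∈ L then g w else none := by
  cases hf : L.findSome? g with
  | none =>
    split_ifs with hw
    · exact ((List.findSome?_eq_none_iff.mp hf) w hw).symm
    · rfl
  | some v =>
    obtain ⟨x, hx, hgx⟩ := List.exists_of_findSome?_eq_some hf
    have hxw := h x hx (by simp [hgx])
    subst hxw
    rw [if_pos hx, hgx]

theorem pvFindSome?_if {a b' : Type} (p : a → Bool) (q : a → b') :
    ∀ (L : List a),
    L.findSome? (fun x => if p x = true then some (q x) else none) = (L.find? p).map q := by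
  intro L
  induction L with
  | nil => rfl
  | cons c L ih =>
    rw [List.findSome?_cons, List.find?_cons]
    cases hp : p c <;> simp [hp, ih]

theorem pvFindSome?_map {a b' c' : Type} (F : a → Option b') (g : b' → c') :
    ∀ (L : List a),
    L.findSome? (fun x => (F x).map g) = (L.findSome? F).map g := by
  intro L
  induction L with
  | nil => rfl
  | cons c L ih =>
    rw [List.findSome?_cons, List.findSome?_cons]
    cases hc : F c <;> simp [hc, ih]

-- ---------- the candidate list of A's quadruple loop ----------

theorem pvFindSome?_congr {a b' : Type} (L : List a) (F G : a → Option b')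
    (h : ∀ x ∈ L, F x = G x) : L.findSome? F = L.findSome? G := by
  induction L with
  | nil => rfl
  | cons c L ih =>
    rw [List.findSome?_cons, List.findSome?_cons, h c List.mem_cons_self,
      ih (fun x hx => h x (List.mem_cons_of_mem _ hx))]

-- extraction of a square candidate

def pvQuads (m n : Nat) : List (Nat × Nat × Nat × Nat) :=
  (List.range m).flatMap fun r1 =>
    (List.range n).flatMap fun c1 =>
      (List.range' r1 (m - r1)).flatMap fun r2 =>
        (List.range' c1 (n - c1)).map fun c2 => (r1, c1, r2, c2)

abbrev pvP0 (count : List (List Int)) (c : Nat × Nat × Nat × Nat) : Prop :=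
  c.2.2.1 - c.1 = c.2.2.2 - c.2.1 ∧ pvValidA count c.1 c.2.1 c.2.2.1 c.2.2.2 = true

def pvF0 (c : Nat × Nat × Nat × Nat) : Int := (((c.2.2.1 - c.1 + 1) * (c.2.2.2 - c.2.1 + 1) : Nat) : Int)

def pvG0 (c : Nat × Nat × Nat × Nat) : (Int × Int) × (Int × Int) :=
  (((c.1 : Int) + 1, (c.2.1 : Int) + 1), ((c.2.2.1 : Int) + 1, (c.2.2.2 : Int) + 1))

theorem pvMem_quads (m n : Nat) (c : Nat × Nat × Nat × Nat) :
    c ∈ pvQuads m n ↔ c.1 ≤ c.2.2.1 ∧ c.2.2.1 < m ∧ c.2.1 ≤ c.2.2.2 ∧ c.2.2.2 < n := by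
  obtain ⟨r1, c1, r2, c2⟩ := c
  simp only [pvQuads, List.mem_flatMap, List.mem_map, List.mem_range, List.mem_range'_1]
  constructor
  · rintro ⟨a1, ha1, a2, ha2, a3, ⟨ha3a, ha3b⟩, a4, ⟨⟨ha4a, ha4b⟩, heq⟩⟩
    obtain ⟨rfl, rfl, rfl, rfl⟩ : a1 = r1 ∧ a2 = c1 ∧ a3 = r2 ∧ a4 = c2 := by
      refine ⟨?_, ?_, ?_, ?_⟩ <;> · have := heq; simp at this; omega
    omega
  · rintro ⟨h1, h2, h3, h4⟩
    exact ⟨r1, by omega, c1, by omega, r2, ⟨by omega, by omega⟩, c2, ⟨⟨by omega, by omega⟩, rfl⟩⟩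

theorem pvFlattenA (count : List (List Int)) (m n : Nat)
    (init : Int × ((Int × Int) × (Int × Int))) :
    (List.range m).foldl (fun st r1 =>
      (List.range n).foldl (fun st c1 =>
        (List.range' r1 (m - r1)).foldl (fun st r2 =>
          (List.range' c1 (n - c1)).foldl (fun st c2 =>
            if r2 - r1 = c2 - c1 then
              if pvValidA count r1 c1 r2 c2 then
                let size : Int := (((r2 - r1 + 1) * (c2 - c1 + 1) : Nat) : Int)
                if st.1 < size then (size, (((r1:Int)+1, (c1:Int)+1), ((r2:Int)+1, (c2:Int)+1)))
                else st
              else st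
            else st) st) st) st) init
    = (pvQuads m n).foldl
        (fun st c => if pvP0 count c ∧ st.1 < pvF0 c then (pvF0 c, pvG0 c) else st) init := by
  rw [pvQuads]
  simp only [List.foldl_flatMap, List.foldl_map]
  congr 1
  funext st r1
  congr 1
  funext st c1
  congr 1
  funext st r2
  congr 1
  funext st c2
  simp only [pvP0, pvF0, pvG0]
  by_cases h1 : r2 - r1 = c2 - c1
  · by_cases h2 : pvValidA count r1 c1 r2 c2 = true
    · by_cases h3 : st.1 < (((r2 - r1 + 1) * (c2 - c1 + 1) : Nat) : Int)
      · simp [h1, h2, h3]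
      · simp [h1, h2, h3]
    · simp [h1, h2]
  · simp [h1]

-- ---------- B's search characterised ----------

abbrev pvCand (count : List (List Int)) (m n s : Nat) : Prop :=
  ∃ r1 < m - s + 1, ∃ c1 < n - s + 1, pvHitB count r1 c1 s = true

def pvS (count : List (List Int)) (m n : Nat) : Nat :=
  Nat.findGreatest (fun s => pvCand count m n s) (min m n)

theorem pvCand_iff_isSome (count : List (List Int)) (m n s : Nat) :
    pvCand count m n s ↔ (pvFindAtB count m n s).isSome = true := by
  simp only [pvCand, pvFindAtB, List.findSome?_isSome_iff, Option.isSome_map,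
    List.find?_isSome, List.mem_range]

theorem pvSearchB_none (count : List (List Int)) (m n : Nat) :
    ∀ k, (∀ s, 1 ≤ s → s ≤ k → ¬ pvCand count m n s) → pvSearchB count m n k = none := by
  intro k
  induction k with
  | zero => intro _; rfl
  | succ k ih =>
    intro h
    have hnone : pvFindAtB count m n (k+1) = none := by
      cases hf : pvFindAtB count m n (k+1) with
      | none => rfl
      | some v =>
        exact absurd ((pvCand_iff_isSome count m n (k+1)).mpr (by simp [hf]))
          (h (k+1) (by omega) le_rfl)
    simp only [pvSearchB, hnone]
    exact ih (fun s hs1 hs2 => h s hs1 (by omega))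

theorem pvS_spec (count : List (List Int)) (m n : Nat) (h : 1 ≤ pvS count m n) :
    pvCand count m n (pvS count m n) := by
  have h0 : pvS count m n ≠ 0 := by omega
  unfold pvS at h0 ⊢
  have hne := mt Nat.findGreatest_eq_zero_iff.mpr h0
  push_neg at hne
  obtain ⟨s, hs0, hsk, hPs⟩ := hne
  exact Nat.findGreatest_spec hsk hPs

-- ---------- the maximum of A's fold is (pvS)^2 ----------

theorem pvSearchB_hit (count : List (List Int)) (m n : Nat) :
    ∀ k, 1 ≤ pvS count m n → pvS count m n ≤ k → k ≤ min m n →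
    pvSearchB count m n k
      = (pvFindAtB count m n (pvS count m n)).map
          (fun rc => (rc.1, rc.2, pvS count m n)) := by
  intro k
  induction k with
  | zero => intro h1 h2 _; omega
  | succ k ih =>
    intro h1 h2 hk
    by_cases he : pvS count m n = k + 1
    · have hc := pvS_spec count m n h1
      rw [he] at hc
      obtain ⟨rc, hrc⟩ := Option.isSome_iff_exists.mp
        ((pvCand_iff_isSome count m n (k+1)).mp hc)
      obtain ⟨r, c⟩ := rc
      rw [he]
      simp only [pvSearchB, hrc, Option.map_some]
    · have hlt : pvS count m n < k + 1 := by omega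
      have hnc : ¬ pvCand count m n (k+1) := by
        unfold pvS at hlt
        exact Nat.findGreatest_is_greatest hlt hk
      have hnone : pvFindAtB count m n (k+1) = none := by
        cases hf : pvFindAtB count m n (k+1) with
        | none => rfl
        | some v =>
          exact absurd ((pvCand_iff_isSome count m n (k+1)).mpr (by simp [hf])) hnc
      simp only [pvSearchB, hnone]
      exact ih h1 (by omega) (by omega)

theorem pvHit_eq_valid (count : List (List Int)) (r1 c1 d : Nat) :
    pvValidA count r1 c1 (r1 + d) (c1 + d) = pvHitB count r1 c1 (d + 1) := by
  simp only [pvValidA, pvHitB, Nat.add_sub_cancel_left]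
  congr 1

theorem pvP0_extract (count : List (List Int)) (m n : Nat) (c : Nat × Nat × Nat × Nat)
    (hc : c ∈ pvQuads m n) (hP : pvP0 count c) :
    ∃ r1 c1 d, c = (r1, c1, r1 + d, c1 + d) ∧ pvCand count m n (d+1) ∧ d + 1 ≤ min m n := by
  obtain ⟨r1, c1, r2, c2⟩ := c
  obtain ⟨h1, h2, h3, h4⟩ := (pvMem_quads m n _).mp hc
  obtain ⟨hdiag, hval⟩ := hP
  dsimp only at h1 h2 h3 h4 hdiag hval
  refine ⟨r1, c1, r2 - r1, ?_, ?_, ?_⟩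
  · simp only [Prod.mk.injEq]
    exact ⟨trivial, trivial, by omega, by omega⟩
  · have hval' : pvValidA count r1 c1 (r1 + (r2 - r1)) (c1 + (r2 - r1)) = true := by
      rw [show r1 + (r2 - r1) = r2 by omega, show c1 + (r2 - r1) = c2 by omega]
      exact hval
    rw [pvHit_eq_valid] at hval'
    exact ⟨r1, by omega, c1, by omega, hval'⟩
  · omega

theorem pvM_eq' (count : List (List Int)) (m n S : Nat)
    (hS : 1 ≤ S → pvCand count m n S)
    (hgt : ∀ s, S < s → s ≤ min m n → ¬ pvCand count m n s)
    (hSle : S ≤ min m n) :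
    pvMax (pvP0 count) pvF0 0 (pvQuads m n) = ((S * S : Nat) : Int) := by
  have hub : ∀ c ∈ pvQuads m n, pvP0 count c → pvF0 c ≤ ((S * S : Nat) : Int) := by
    intro c hc hP
    obtain ⟨r1, c1, d, rfl, hcand, hdle⟩ := pvP0_extract count m n c hc hP
    have hdS : d + 1 ≤ S := by
      by_contra hlt
      exact hgt (d+1) (by omega) hdle hcand
    unfold pvF0
    dsimp only
    rw [show r1 + d - r1 + 1 = d + 1 by omega, show c1 + d - c1 + 1 = d + 1 by omega]
    exact Int.ofNat_le.mpr (Nat.mul_le_mul hdS hdS)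
  by_cases hS1 : 1 ≤ S
  · refine Int.le_antisymm (pvMax_le _ _ _ 0 _ (by omega) hub) ?_
    obtain ⟨d, rfl⟩ : ∃ d, S = d + 1 := ⟨S - 1, by omega⟩
    obtain ⟨r1, hr1, c1, hc1, hhit⟩ := hS hS1
    have hmem : (r1, c1, r1 + d, c1 + d) ∈ pvQuads m n := by
      rw [pvMem_quads]
      dsimp only
      omega
    have hP : pvP0 count (r1, c1, r1 + d, c1 + d) := by
      refine ⟨by dsimp only; omega, ?_⟩
      show pvValidA count r1 c1 (r1 + d) (c1 + d) = true
      rw [pvHit_eq_valid]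
      exact hhit
    have hge := pvMax_ge (pvP0 count) pvF0 (pvQuads m n) 0 _ hmem hP
    refine Int.le_trans (Int.le_of_eq ?_) hge
    unfold pvF0
    dsimp only
    rw [show r1 + d - r1 + 1 = d + 1 by omega, show c1 + d - c1 + 1 = d + 1 by omega]
  · have hnone : ∀ c ∈ pvQuads m n, ¬ pvP0 count c := by
      intro c hc hP
      obtain ⟨r1, c1, d, rfl, hcand, hdle⟩ := pvP0_extract count m n c hc hP
      exact hgt (d+1) (by omega) hdle hcand
    rw [pvMax_eq_self _ _ _ _ hnone]
    obtain rfl : S = 0 := by omega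
    rfl

theorem pvPredTrue (count : List (List Int)) (d r1 c1 r2 c2 : Nat) (hr : r1 ≤ r2) (hc : c1 ≤ c2)
    (hp : (decide (pvP0 count (r1,c1,r2,c2)) && decide (pvF0 (r1,c1,r2,c2) = (((d+1)*(d+1) : Nat) : Int))) = true) :
    r2 = r1 + d ∧ c2 = c1 + d := by
  rw [Bool.and_eq_true, decide_eq_true_eq, decide_eq_true_eq] at hp
  obtain ⟨⟨hdiag, _⟩, hf⟩ := hp
  dsimp only at hdiag
  unfold pvF0 at hf
  dsimp only at hf
  have hfn : (r2 - r1 + 1) * (c2 - c1 + 1) = (d+1)*(d+1) := by omega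
  rw [← hdiag] at hfn
  have := Nat.mul_self_inj.mp hfn
  omega

theorem pvCell (count : List (List Int)) (m n d r1 c1 : Nat) :
    (List.range' r1 (m - r1)).findSome? (fun r2 =>
      ((List.range' c1 (n - c1)).map (fun c2 => (r1, c1, r2, c2))).find? (fun c =>
        decide (pvP0 count c) && decide (pvF0 c = (((d+1) * (d+1) : Nat) : Int))))
    = if r1 + d < m ∧ c1 + d < n ∧ pvHitB count r1 c1 (d+1) = true
      then some (r1, c1, r1 + d, c1 + d) else none := by
  have h1 : ∀ r2 ∈ List.range' r1 (m - r1),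
      ((List.range' c1 (n - c1)).map (fun c2 => (r1, c1, r2, c2))).find? (fun c =>
        decide (pvP0 count c) && decide (pvF0 c = (((d+1) * (d+1) : Nat) : Int))) ≠ none → r2 = r1 + d := by
    intro r2 hr2 hne
    obtain ⟨q, hq⟩ := Option.ne_none_iff_exists'.mp hne
    have hqmem := List.mem_of_find?_eq_some hq
    have hqp := List.find?_some hq
    obtain ⟨c2, hc2, rfl⟩ := List.mem_map.mp hqmem
    exact (pvPredTrue count d r1 c1 r2 c2 (List.mem_range'_1.mp hr2).1
      (List.mem_range'_1.mp hc2).1 hqp).1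
  rw [pvFindSome?_unique _ _ (r1 + d) h1]
  by_cases hm : r1 + d < m
  · have hmem : r1 + d ∈ List.range' r1 (m - r1) := List.mem_range'_1.mpr ⟨by omega, by omega⟩
    rw [if_pos hmem, List.find?_map]
    have h2 : ∀ c2 ∈ List.range' c1 (n - c1),
        ((fun c => decide (pvP0 count c) && decide (pvF0 c = (((d+1) * (d+1) : Nat) : Int))) ∘
          (fun c2 => (r1, c1, r1 + d, c2))) c2 = true → c2 = c1 + d := by
      intro c2 hc2 hp
      exact (pvPredTrue count d r1 c1 (r1+d) c2 (by omega) (List.mem_range'_1.mp hc2).1 hp).2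
    rw [pvFind?_unique _ _ (c1 + d) h2]
    by_cases hn : c1 + d < n
    · have hmem2 : c1 + d ∈ List.range' c1 (n - c1) := List.mem_range'_1.mpr ⟨by omega, by omega⟩
      have hpred : ((fun c => decide (pvP0 count c) && decide (pvF0 c = (((d+1) * (d+1) : Nat) : Int))) ∘
          (fun c2 => (r1, c1, r1 + d, c2))) (c1 + d) = pvHitB count r1 c1 (d+1) := by
        show (decide (pvP0 count (r1,c1,r1+d,c1+d)) && decide (pvF0 (r1,c1,r1+d,c1+d) = (((d+1)*(d+1):Nat):Int))) = pvHitB count r1 c1 (d+1)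
        have e1 : pvP0 count (r1,c1,r1+d,c1+d) ↔ (pvHitB count r1 c1 (d+1) = true) := by
          unfold pvP0
          dsimp only
          rw [pvHit_eq_valid]
          exact ⟨fun h => h.2, fun h => ⟨by omega, h⟩⟩
        have e2 : pvF0 (r1,c1,r1+d,c1+d) = (((d+1)*(d+1):Nat):Int) := by
          unfold pvF0
          dsimp only
          rw [show r1+d-r1+1 = d+1 by omega, show c1+d-c1+1 = d+1 by omega]
        rw [decide_eq_true e2, Bool.and_true]
        cases hh : pvHitB count r1 c1 (d+1)
        · exact decide_eq_false (fun hp => by rw [e1.mp hp] at hh; cases hh)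
        · exact decide_eq_true (e1.mpr hh)
      cases hh : pvHitB count r1 c1 (d+1)
      · rw [if_neg (fun hand => by rw [hpred, hh] at hand; exact Bool.false_ne_true hand.2),
          if_neg (fun hand => Bool.false_ne_true hand.2.2)]
        rfl
      · rw [if_pos ⟨hmem2, by rw [hpred, hh]⟩, if_pos ⟨hm, hn, rfl⟩]
        rfl
    · rw [if_neg (fun hand => hn (by have := List.mem_range'_1.mp hand.1; omega)),
        if_neg (fun hand => hn hand.2.1)]
      rfl
  · rw [if_neg (fun hmem2 => hm (by have := List.mem_range'_1.mp hmem2; omega)),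
      if_neg (fun hand => hm hand.1)]

theorem pvRowEq (count : List (List Int)) (m n d : Nat) (hd : d + 1 ≤ min m n) (r1 : Nat) :
    (List.range n).findSome? (fun c1 =>
      if r1 + d < m ∧ c1 + d < n ∧ pvHitB count r1 c1 (d+1) = true
      then some (r1, c1, r1 + d, c1 + d) else none)
    = if r1 + d < m then
        ((List.range (n - (d+1) + 1)).find? (fun c1 => pvHitB count r1 c1 (d+1))).map
          (fun c1 => (r1, c1, r1 + d, c1 + d))
      else none := by
  have hdn : d + 1 ≤ n := by omega
  by_cases h1 : r1 + d < m
  · rw [if_pos h1]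
    have hsplit : List.range n
        = List.range (n - (d+1) + 1) ++ (List.range d).map (fun j => (n - (d+1) + 1) + j) := by
      have hn : n = (n - (d+1) + 1) + d := by omega
      have hsp := List.range_add (n := n - (d+1) + 1) (m := d)
      rw [← hn] at hsp
      exact hsp
    rw [hsplit, List.findSome?_append]
    have hsuf : ((List.range d).map (fun j => (n - (d+1) + 1) + j)).findSome? (fun c1 =>
        if r1 + d < m ∧ c1 + d < n ∧ pvHitB count r1 c1 (d+1) = true
        then some (r1, c1, r1 + d, c1 + d) else none) = none := by
      rw [List.findSome?_eq_none_iff]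
      intro x hx
      obtain ⟨j, hj, rfl⟩ := List.mem_map.mp hx
      have hjlt := List.mem_range.mp hj
      exact if_neg (fun hand => by omega)
    rw [hsuf, Option.or_none]
    have hcg : ∀ c1 ∈ List.range (n - (d+1) + 1),
        (if r1 + d < m ∧ c1 + d < n ∧ pvHitB count r1 c1 (d+1) = true
         then some (r1, c1, r1 + d, c1 + d) else none)
        = (if pvHitB count r1 c1 (d+1) = true then some (r1, c1, r1 + d, c1 + d) else none) := by
      intro c1 hc1
      have hlt := List.mem_range.mp hc1
      by_cases hh : pvHitB count r1 c1 (d+1) = true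
      · rw [if_pos ⟨h1, by omega, hh⟩, if_pos hh]
      · rw [if_neg (fun hand => hh hand.2.2), if_neg hh]
    rw [pvFindSome?_congr _ _ _ hcg, pvFindSome?_if]
  · rw [if_neg h1, List.findSome?_eq_none_iff]
    intro c1 _
    exact if_neg (fun hand => h1 hand.1)

theorem pvFind_eq (count : List (List Int)) (m n d : Nat) (hd : d + 1 ≤ min m n) :
    (pvQuads m n).find? (fun c =>
      decide (pvP0 count c) && decide (pvF0 c = (((d+1) * (d+1) : Nat) : Int)))
    = (pvFindAtB count m n (d+1)).map (fun rc => (rc.1, rc.2, rc.1 + d, rc.2 + d)) := by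
  have hdm : d + 1 ≤ m := by omega
  rw [pvQuads]
  simp only [pvFind?_flatMap]
  have hrow : ∀ r1 ∈ List.range m,
      (List.range n).findSome? (fun c1 =>
        (List.range' r1 (m - r1)).findSome? (fun r2 =>
          ((List.range' c1 (n - c1)).map (fun c2 => (r1, c1, r2, c2))).find? (fun c =>
            decide (pvP0 count c) && decide (pvF0 c = (((d+1) * (d+1) : Nat) : Int)))))
      = if r1 + d < m then
          ((List.range (n - (d+1) + 1)).find? (fun c1 => pvHitB count r1 c1 (d+1))).map
            (fun c1 => (r1, c1, r1 + d, c1 + d))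
        else none := by
    intro r1 _
    rw [pvFindSome?_congr _ _ _ (fun c1 _ => pvCell count m n d r1 c1)]
    exact pvRowEq count m n d hd r1
  rw [pvFindSome?_congr _ _ _ hrow]
  have hsplit : List.range m
      = List.range (m - (d+1) + 1) ++ (List.range d).map (fun j => (m - (d+1) + 1) + j) := by
    have hm : m = (m - (d+1) + 1) + d := by omega
    have hsp := List.range_add (n := m - (d+1) + 1) (m := d)
    rw [← hm] at hsp
    exact hsp
  rw [hsplit, List.findSome?_append]
  have hsuf : ((List.range d).map (fun j => (m - (d+1) + 1) + j)).findSome? (fun r1 =>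
      if r1 + d < m then
        ((List.range (n - (d+1) + 1)).find? (fun c1 => pvHitB count r1 c1 (d+1))).map
          (fun c1 => (r1, c1, r1 + d, c1 + d))
      else none) = none := by
    rw [List.findSome?_eq_none_iff]
    intro x hx
    obtain ⟨j, hj, rfl⟩ := List.mem_map.mp hx
    exact if_neg (by omega)
  rw [hsuf, Option.or_none]
  have hcg2 : ∀ r1 ∈ List.range (m - (d+1) + 1),
      (if r1 + d < m then
        ((List.range (n - (d+1) + 1)).find? (fun c1 => pvHitB count r1 c1 (d+1))).map
          (fun c1 => (r1, c1, r1 + d, c1 + d))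
      else none)
      = ((List.range (n - (d+1) + 1)).find? (fun c1 => pvHitB count r1 c1 (d+1))).map
          (fun c1 => (r1, c1, r1 + d, c1 + d)) := by
    intro r1 hr1
    have := List.mem_range.mp hr1
    exact if_pos (by omega)
  rw [pvFindSome?_congr _ _ _ hcg2]
  unfold pvFindAtB
  rw [← pvFindSome?_map]
  refine pvFindSome?_congr _ _ _ (fun r1 _ => ?_)
  rw [Option.map_map]
  rfl

theorem pvStatePos (count : List (List Int)) (m n d r c : Nat)
    (hgt : ∀ s, (d + 1) < s → s ≤ min m n → ¬ pvCand count m n s)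
    (hSle : d + 1 ≤ min m n)
    (hfind : pvFindAtB count m n (d+1) = some (r, c)) :
    (List.range m).foldl (fun st r1 =>
      (List.range n).foldl (fun st c1 =>
        (List.range' r1 (m - r1)).foldl (fun st r2 =>
          (List.range' c1 (n - c1)).foldl (fun st c2 =>
            if r2 - r1 = c2 - c1 then
              if pvValidA count r1 c1 r2 c2 then
                let size : Int := (((r2 - r1 + 1) * (c2 - c1 + 1) : Nat) : Int)
                if st.1 < size then (size, (((r1:Int)+1, (c1:Int)+1), ((r2:Int)+1, (c2:Int)+1)))
                else st
              else st
            else st) st) st) st) ((0:Int), (((0:Int),(0:Int)),((0:Int),(0:Int))))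
    = ((((d+1) * (d+1) : Nat) : Int),
       (((r : Int) + 1, (c : Int) + 1), (((r + d : Nat) : Int) + 1, ((c + d : Nat) : Int) + 1))) := by
  have hcand : pvCand count m n (d+1) := (pvCand_iff_isSome count m n (d+1)).mpr (by rw [hfind]; rfl)
  rw [pvFlattenA, pvFoldChar]
  rw [pvM_eq' count m n (d+1) (fun _ => hcand) hgt hSle]
  have hne : ((d+1) * (d+1) : Nat) ≠ 0 := Nat.mul_ne_zero (by omega) (by omega)
  rw [if_neg (by omega)]
  rw [pvFind_eq count m n d hSle, hfind]
  rfl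

theorem pvStateNone (count : List (List Int)) (m n : Nat)
    (hnone : ∀ s, 1 ≤ s → s ≤ min m n → ¬ pvCand count m n s) :
    (List.range m).foldl (fun st r1 =>
      (List.range n).foldl (fun st c1 =>
        (List.range' r1 (m - r1)).foldl (fun st r2 =>
          (List.range' c1 (n - c1)).foldl (fun st c2 =>
            if r2 - r1 = c2 - c1 then
              if pvValidA count r1 c1 r2 c2 then
                let size : Int := (((r2 - r1 + 1) * (c2 - c1 + 1) : Nat) : Int)
                if st.1 < size then (size, (((r1:Int)+1, (c1:Int)+1), ((r2:Int)+1, (c2:Int)+1)))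
                else st
              else st
            else st) st) st) st) ((0:Int), (((0:Int),(0:Int)),((0:Int),(0:Int))))
    = ((0:Int), (((0:Int),(0:Int)),((0:Int),(0:Int)))) := by
  rw [pvFlattenA, pvFoldChar]
  rw [pvM_eq' count m n 0 (fun h => absurd h (by omega)) (fun s hs1 hs2 => hnone s (by omega) hs2) (by omega)]
  rw [if_pos (show ((0 * 0 : Nat) : Int) = 0 from rfl)]

theorem pvBridge (count : List (List Int)) (m n : Nat) :
    (let st := (List.range m).foldl (fun st r1 =>
      (List.range n).foldl (fun st c1 =>
        (List.range' r1 (m - r1)).foldl (fun st r2 =>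
          (List.range' c1 (n - c1)).foldl (fun st c2 =>
            if r2 - r1 = c2 - c1 then
              if pvValidA count r1 c1 r2 c2 then
                let size : Int := (((r2 - r1 + 1) * (c2 - c1 + 1) : Nat) : Int)
                if st.1 < size then (size, (((r1:Int)+1, (c1:Int)+1), ((r2:Int)+1, (c2:Int)+1)))
                else st
              else st
            else st) st) st) st)
      ((0:Int), (((0:Int),(0:Int)),((0:Int),(0:Int))));
     [st.2.1.1, st.2.1.2, st.2.2.1, st.2.2.2])
    = match pvSearchB count m n (min m n) with
      | some (r, c, s) => [(r:Int)+1, (c:Int)+1, ((r+s : Nat) : Int), ((c+s : Nat) : Int)]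
      | none => [0, 0, 0, 0] := by
  by_cases hS1 : 1 ≤ pvS count m n
  · obtain ⟨d, hd⟩ : ∃ d, pvS count m n = d + 1 := ⟨pvS count m n - 1, by omega⟩
    have hSle : pvS count m n ≤ min m n := Nat.findGreatest_le _
    have hgt : ∀ s, pvS count m n < s → s ≤ min m n → ¬ pvCand count m n s := by
      intro s hs1 hs2
      exact Nat.findGreatest_is_greatest hs1 hs2
    have hcand := pvS_spec count m n hS1
    obtain ⟨rc, hfind⟩ := Option.isSome_iff_exists.mp ((pvCand_iff_isSome count m n _).mp hcand)
    obtain ⟨r, c⟩ := rc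
    have hsearch := pvSearchB_hit count m n (min m n) hS1 hSle le_rfl
    rw [hfind, Option.map_some] at hsearch
    rw [hd] at hfind hsearch hSle
    have hgt' : ∀ s, d + 1 < s → s ≤ min m n → ¬ pvCand count m n s := by
      intro s hs1 hs2
      exact hgt s (by omega) hs2
    rw [hsearch, pvStatePos count m n d r c hgt' hSle hfind]
    show [(r : Int) + 1, (c : Int) + 1, ((r + d : Nat) : Int) + 1, ((c + d : Nat) : Int) + 1]
      = [(r : Int) + 1, (c : Int) + 1, ((r + (d+1) : Nat) : Int), ((c + (d+1) : Nat) : Int)]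
    push_cast
    ring_nf
  · have hnone : ∀ s, 1 ≤ s → s ≤ min m n → ¬ pvCand count m n s := by
      intro s h1 h2 hcand
      have h3 : s ≤ pvS count m n := Nat.le_findGreatest h2 hcand
      omega
    rw [pvSearchB_none count m n (min m n) hnone, pvStateNone count m n hnone]

-- ===== VERDICT (by name: the statement is the Claim_ definition above) =====
theorem find_p1_m2n2_spec : Claim_equal_find_p1_m2n2 := by
  intro p h_ _dom _pre
  show find_p1_m2n2 p h_ = find_p1_m2n2_alt p h_
  unfold find_p1_m2n2 find_p1_m2n2_alt
  have hPB : pvPrefixB = pvPreprocess := rfl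
  rw [hPB]
  exact pvBridge (pvPreprocess p h_) p.length ((p.getD 0 []).length)
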